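-- pv_equiv track=rewrite | github.com/voita-duff/school-work | src/seminar ukoly/12_completed.py | fractal_triangle
-- ===== SOURCE A (Python) =====
-- def fractal_triangle(n, symbol):
--     """
--     Vytváří data reprezentující Sierpińského trojúhěníku pro danou hloubku rekurze.
--     Args:
--         n (int): Hloubka rekurze, určuje velikost trojúhěníku.
--         symbol (str): Symbol použitý k vykreslení trojúhěníku.
--     Returns:
--         list[str]: Seznam řádků reprezentující trojúhěník.
--     """
--
--     if n == 0:
--         return [symbol]
--
--     # Rekurzivní volání pro předchozí úroveň
--     smaller_triangle = fractal_triangle(n - 1, symbol)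
--
--     # Vytvoření odsazené části
--     padding = " " * len(smaller_triangle)
--     top_part = [padding + line + padding for line in smaller_triangle]
--
--     # Vytvoření spodní části
--     bottom_part = [line + " " + line for line in smaller_triangle]
--
--     return top_part + bottom_part
-- ===== SOURCE B (Python) =====
-- def fractal_triangle(n, symbol):
--     """Iterative re-implementation: grow the triangle level by level."""
--     lines = [symbol]
--     for _ in range(n):
--         padding = " " * len(lines)
--         lines = [padding + line + padding for line in lines] + \
--                 [line + " " + line for line in lines]
--     return lines
-- ===== Notes on version B (the rewrite author's own statement) =====
-- stated objective: alternative
-- what changed: Replaced the top-down recursion by a bottom-up iteration that rewrites the line list n times, computing the padding from the current line count.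
import Mathlib
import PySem

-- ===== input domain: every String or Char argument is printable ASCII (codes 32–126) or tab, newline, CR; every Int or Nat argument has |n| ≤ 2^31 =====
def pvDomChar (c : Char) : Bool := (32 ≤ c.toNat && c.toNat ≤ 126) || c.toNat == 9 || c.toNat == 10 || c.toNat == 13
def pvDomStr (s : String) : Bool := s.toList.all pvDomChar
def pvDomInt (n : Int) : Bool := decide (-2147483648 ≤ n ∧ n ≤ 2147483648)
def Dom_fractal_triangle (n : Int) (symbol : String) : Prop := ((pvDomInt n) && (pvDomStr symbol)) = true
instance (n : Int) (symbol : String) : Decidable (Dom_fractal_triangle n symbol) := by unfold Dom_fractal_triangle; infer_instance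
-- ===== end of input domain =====

-- B replaces A's top-down recursion by a bottom-up iteration over range(n) (alternative decomposition, same cost).


-- ===== PORT A =====
-- A's recursion on n; for n < 0 Python recurses without bound (RecursionError), so the
-- port recurses on n.toNat and Pre_ restricts the claim to 0 ≤ n.
def fractal_triangle_go (k : Nat) (symbol : String) : List String :=
  match k with
  | 0 => [symbol]
  | Nat.succ m =>
    let smaller_triangle := fractal_triangle_go m symbol
    let padding := String.ofList (List.replicate smaller_triangle.length ' ')
    let top_part := smaller_triangle.map (fun line => padding ++ line ++ padding)
    let bottom_part := smaller_triangle.map (fun line => line ++ " " ++ line)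
    top_part ++ bottom_part

def fractal_triangle (n : Int) (symbol : String) : List String :=
  fractal_triangle_go n.toNat symbol

-- ===== PORT B =====
def fractal_triangle_alt (n : Int) (symbol : String) : List String :=
  (PySem.List.pyRange 0 n 1).foldl
    (fun lines _ =>
      let padding := String.ofList (List.replicate lines.length ' ')
      (lines.map fun line => padding ++ line ++ padding) ++
      (lines.map fun line => line ++ " " ++ line))
    [symbol]

-- ===== PRECONDITION & SPEC =====
-- Pre_ excludes n < 0, where A never returns (unbounded recursion → RecursionError).
def Pre_fractal_triangle (n : Int) (symbol : String) : Prop := 0 ≤ n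
instance (n : Int) (symbol : String) : Decidable (Pre_fractal_triangle n symbol) := by unfold Pre_fractal_triangle; infer_instance
def pvWitness_fractal_triangle : Int × String := (2, "*")

def Spec_fractal_triangle (n : Int) (symbol : String) (out : List String) : Prop := out = fractal_triangle_alt n symbol
instance (n : Int) (symbol : String) (out : List String) : Decidable (Spec_fractal_triangle n symbol out) := by unfold Spec_fractal_triangle; infer_instance

-- ===== CLAIM (what is proved, stated in full; the proofs are below) =====
def Claim_equal_fractal_triangle : Prop := ∀ (n : Int) (symbol : String), Dom_fractal_triangle n symbol → Pre_fractal_triangle n symbol → Spec_fractal_triangle n symbol (fractal_triangle n symbol)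

-- ===== LEMMAS AND PROOFS =====
-- B's fold over range(0, m) applied m times equals A's recursion to depth m.
theorem foldl_range_eq_go (symbol : String) (m : Nat) :
    (PySem.List.pyRange 0 (m : Int) 1).foldl
      (fun lines _ =>
        let padding := String.ofList (List.replicate lines.length ' ')
        (lines.map fun line => padding ++ line ++ padding) ++
        (lines.map fun line => line ++ " " ++ line))
      [symbol] = fractal_triangle_go m symbol := by
  induction m with
  | zero => simp [PySem.List.pyRange_one_eq_nil, fractal_triangle_go]
  | succ m ih =>
    have h : ((m : Int) + 1) = ((m + 1 : Nat) : Int) := by push_cast; ring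
    rw [← h, PySem.List.pyRange_one_succ_right (by positivity), List.foldl_append, ih]
    simp [fractal_triangle_go]

-- ===== VERDICT (by name: the statement is the Claim_ definition above) =====
theorem fractal_triangle_spec : Claim_equal_fractal_triangle := by
  intro n symbol _ hpre
  unfold Spec_fractal_triangle fractal_triangle fractal_triangle_alt
  have hn : (n.toNat : Int) = n := Int.toNat_of_nonneg hpre
  rw [← hn]
  exact (foldl_range_eq_go symbol n.toNat).symm
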